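-- pv_equiv track=rewrite | github.com/MrBrantCode/unitest_baseline | mut_generate/mist_train_taco/taco_16715/solution.py | count_matching_words
-- ===== SOURCE A (Python) =====
-- from collections import defaultdict
--
-- def count_matching_words(words, patterns):
--     # Create a dictionary to count occurrences of each word
--     word_count = defaultdict(int)
--     for word in words:
--         word_count[word] += 1
--
--     # List of possible characters
--     tb = ['a', 'b', 'c', 'd', 'e']
--
--     # Function to perform depth-first search for pattern matching
--     def dfs(pattern, l, u, res, st, word_count):
--         if u == l:
--             if res in st:
--                 return 0
--             if res in word_count:
--                 return word_count[res]
--             return 0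
--
--         cnt = 0
--         if pattern[u] == '?':
--             for i in range(6):
--                 if i != 5:
--                     cnt += dfs(pattern, l, u + 1, res + tb[i], st, word_count)
--                 else:
--                     cnt += dfs(pattern, l, u + 1, res, st, word_count)
--         else:
--             cnt += dfs(pattern, l, u + 1, res + pattern[u], st, word_count)
--
--         return cnt
--
--     # Result list to store the count of matching words for each pattern
--     result = []
--
--     # Process each pattern
--     for pattern in patterns:
--         l = len(pattern)
--         st = set()
--         cnt = dfs(pattern, l, 0, '', st, word_count)
--         result.append(cnt)
--
--     return result
-- ===== SOURCE B (Python) =====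
-- def count_matching_words(words, patterns):
--     # Count each distinct word once; for a pattern without wildcards the answer is a
--     # single dict lookup, otherwise a pattern x word alignment DP over the distinct
--     # words whose length the pattern can reach (each '?' is a letter a-e or deleted).
--     word_count = {}
--     for w in words:
--         word_count[w] = word_count.get(w, 0) + 1
--
--     letters = 'abcde'
--
--     def ways(pattern, word):
--         n = len(word)
--         # f[j] = number of ways the already-processed pattern suffix generates word[j:]
--         f = [0] * n + [1]
--         for ch in reversed(pattern):
--             if ch == '?':
--                 g = [f[j] + (f[j + 1] if j < n and word[j] in letters else 0)
--                      for j in range(n + 1)]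
--             else:
--                 g = [(f[j + 1] if j < n and word[j] == ch else 0)
--                      for j in range(n + 1)]
--             f = g
--         return f[0]
--
--     result = []
--     for p in patterns:
--         k = p.count('?')
--         if k == 0:
--             result.append(word_count.get(p, 0))
--         else:
--             L = len(p)
--             result.append(sum(c * ways(p, w) for w, c in word_count.items()
--                               if L - k <= len(w) <= L))
--     return result
-- ===== Notes on version B (the rewrite author's own statement) =====
-- stated objective: faster
-- what changed: Replaces A's per-pattern DFS that enumerates all 6^k wildcard expansions (5 letters or deletion per '?') with a single dict lookup for wildcard-free patterns and a pattern-by-word alignment DP over the length-compatible distinct words otherwise, weighting by multiplicity.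
import Mathlib
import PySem

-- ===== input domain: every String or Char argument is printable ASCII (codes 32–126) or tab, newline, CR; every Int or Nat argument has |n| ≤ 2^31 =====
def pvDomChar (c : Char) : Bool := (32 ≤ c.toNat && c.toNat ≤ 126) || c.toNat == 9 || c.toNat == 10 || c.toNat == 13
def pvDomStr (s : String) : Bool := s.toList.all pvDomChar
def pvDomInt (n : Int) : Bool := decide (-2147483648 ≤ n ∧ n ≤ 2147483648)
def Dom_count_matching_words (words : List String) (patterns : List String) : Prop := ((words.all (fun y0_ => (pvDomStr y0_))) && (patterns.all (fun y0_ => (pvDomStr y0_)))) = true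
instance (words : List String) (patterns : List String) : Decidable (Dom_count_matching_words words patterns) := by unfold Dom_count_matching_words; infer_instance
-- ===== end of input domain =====

-- B replaces A's exponential per-pattern DFS over all 6^k wildcard expansions by a
-- pattern×word alignment DP over the distinct words (objective: faster, asymptotic).

-- ===== PORT A =====
-- A's dfs: recursion on the pattern position u; `st` is A's (always empty) set,
-- `wc` the word-count dict (word strings represented as List Char).
-- The literal `for i in range(6)` loop (constant bounds, branch on i == 5) is
-- transliterated by unrolling its six fixed iterations in order: i = 0..4 append
-- tb[i] = 'a'..'e' to res, i = 5 keeps res; cnt accumulates left to right.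
def dfsA (pattern : List Char) (l u : Nat) (res : List Char)
    (st : PySem.Set (List Char)) (wc : PySem.Dict (List Char) Int) : Int :=
  if u = l then
    if st.contains res then 0
    else
      match wc.get? res with   -- `if res in word_count: return word_count[res]` / `return 0`
      | some v => v
      | none => 0
  else if h : u < pattern.length then   -- guard for totality; Python's pattern[u] is in range whenever dfs recurses
    let c := pattern[u]
    if c = '?' then
      0 + dfsA pattern l (u + 1) (res ++ ['a']) st wc
        + dfsA pattern l (u + 1) (res ++ ['b']) st wc
        + dfsA pattern l (u + 1) (res ++ ['c']) st wc
        + dfsA pattern l (u + 1) (res ++ ['d']) st wc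
        + dfsA pattern l (u + 1) (res ++ ['e']) st wc
        + dfsA pattern l (u + 1) res st wc
    else 0 + dfsA pattern l (u + 1) (res ++ [c]) st wc
  else 0   -- unreachable in A's executions (there u ≤ l = pattern.length always)
termination_by pattern.length - u
decreasing_by all_goals omega

def count_matching_words (words : List String) (patterns : List String) : List Int :=
  let word_count := words.foldl (fun d w => d.modify w.toList 0 (· + 1)) PySem.Dict.empty
  patterns.foldl (fun result pat =>
    let l := pat.toList.length
    let st : PySem.Set (List Char) := PySem.Set.ofList []
    result ++ [dfsA pat.toList l 0 [] st word_count]) []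

-- ===== PORT B =====
def lettersB : List Char := ['a', 'b', 'c', 'd', 'e']

-- Source B's `ways`: right-to-left DP over the pattern; f.getD j 0 renders the
-- in-range indexing f[j] / word[j] of Source B.
def waysB (pattern word : List Char) : Int :=
  let n := word.length
  let f0 : List Int := List.replicate n 0 ++ [1]
  let f := pattern.reverse.foldl (fun f ch =>
    if ch = '?' then
      (List.range (n + 1)).map (fun j =>
        f.getD j 0 + (if j < n ∧ word.getD j ' ' ∈ lettersB then f.getD (j + 1) 0 else 0))
    else
      (List.range (n + 1)).map (fun j =>
        if j < n ∧ word.getD j ' ' = ch then f.getD (j + 1) 0 else 0)) f0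
  f.getD 0 0

-- Source B's main loop; `p.count('?')` for the one-character needle '?' is the
-- character count, ported as List.count.
def count_matching_words_alt (words : List String) (patterns : List String) : List Int :=
  let word_count := words.foldl (fun d w => d.insert w.toList (d.getD w.toList 0 + 1)) PySem.Dict.empty
  patterns.map (fun pat =>
    let p := pat.toList
    let k := p.count '?'
    if k = 0 then word_count.getD p 0
    else (word_count.items.map (fun wv =>
      if p.length - k ≤ wv.1.length ∧ wv.1.length ≤ p.length
      then wv.2 * waysB p wv.1 else 0)).sum)

-- ===== PRECONDITION & SPEC =====
def Spec_count_matching_words (words : List String) (patterns : List String) (out : List Int) : Prop := out = count_matching_words_alt words patterns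
instance (words : List String) (patterns : List String) (out : List Int) : Decidable (Spec_count_matching_words words patterns out) := by unfold Spec_count_matching_words; infer_instance

-- ===== CLAIM (what is proved, stated in full; the proofs are below) =====
def Claim_equal_count_matching_words : Prop := ∀ (words : List String) (patterns : List String), Dom_count_matching_words words patterns → Spec_count_matching_words words patterns (count_matching_words words patterns)

-- ===== LEMMAS AND PROOFS =====

-- Reference count: Wref ps w = number of ways pattern ps generates word w
-- ('?' = one of 'a'..'e' or deletion; a literal character must match).
def Wref : List Char → List Char → Int
  | [], w => if w = [] then 1 else 0
  | p :: ps, w =>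
    if p = '?' then
      Wref ps w + (match w with
        | [] => 0
        | x :: xs => if x ∈ lettersB then Wref ps xs else 0)
    else
      match w with
      | [] => 0
      | x :: xs => if x = p then Wref ps xs else 0


-- ---- B side: the DP computes Wref ----

lemma bfold_eq (word : List Char) (ps : List Char) :
    ps.foldr (fun ch f =>
      if ch = '?' then
        (List.range (word.length + 1)).map (fun j =>
          f.getD j 0 + (if j < word.length ∧ word.getD j ' ' ∈ lettersB then f.getD (j + 1) 0 else 0))
      else
        (List.range (word.length + 1)).map (fun j =>
          if j < word.length ∧ word.getD j ' ' = ch then f.getD (j + 1) 0 else 0))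
      (List.replicate word.length 0 ++ [1])
    = (List.range (word.length + 1)).map (fun j => Wref ps (word.drop j)) := by
  induction ps with
  | nil =>
    simp only [List.foldr]
    apply List.ext_getElem
    · simp
    intro i h1 h2
    simp only [List.length_append, List.length_replicate, List.length_map, List.length_range] at h1 h2
    rw [List.getElem_map]
    simp only [List.getElem_range]
    by_cases hi : i < word.length
    · rw [List.getElem_append_left (by simpa using hi)]
      simp [Wref, Nat.not_le.mpr hi]
    · have : i = word.length := by omega
      subst this
      rw [List.getElem_append_right (by simp)]
      simp [Wref]
  | cons ch ps ih =>
    simp only [List.foldr_cons, ih]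
    by_cases hch : ch = '?'
    · simp only [hch]
      apply List.map_congr_left
      intro j hj
      rw [List.mem_range] at hj
      rw [PySem.List.getD_map_range _ _ _ _ hj]
      by_cases hjn : j < word.length
      · rw [PySem.List.getD_map_range _ _ _ _ (by omega)]
        have hd : word.drop j = word[j] :: word.drop (j + 1) := List.drop_eq_getElem_cons hjn
        rw [hd]
        simp [Wref, hjn, ← hd]
      · have hj' : j = word.length := by omega
        subst hj'
        simp [Wref, List.drop_length]
    · simp only [if_neg hch]
      apply List.map_congr_left
      intro j hj
      rw [List.mem_range] at hj
      by_cases hjn : j < word.length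
      · rw [PySem.List.getD_map_range _ _ _ _ (by omega)]
        have hd : word.drop j = word[j] :: word.drop (j + 1) := List.drop_eq_getElem_cons hjn
        rw [hd]
        simp [Wref, hch, hjn]
      · have hj' : j = word.length := by omega
        subst hj'
        simp [Wref, hch, List.drop_length]

lemma waysB_eq (pattern word : List Char) : waysB pattern word = Wref pattern word := by
  unfold waysB
  simp only [List.foldl_reverse, bfold_eq]
  rw [PySem.List.getD_map_range _ _ _ _ (Nat.succ_pos _)]
  simp


-- ---- A side: dfs computes the weighted sum of Wref over the counted words ----

lemma letter_sum (y : Char) (v : Int) :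
    (if y = 'a' then v else 0) + (if y = 'b' then v else 0) + (if y = 'c' then v else 0)
      + (if y = 'd' then v else 0) + (if y = 'e' then v else 0)
    = if y ∈ lettersB then v else 0 := by
  simp only [lettersB, List.mem_cons, List.not_mem_nil, or_false]
  split_ifs <;> simp_all


lemma key_snoc (F : List Char → Int) (res w : List Char) (x : Char) :
    (if res ++ [x] <+: w then F (w.drop (res.length + 1)) else 0)
    = (if res <+: w then
        (match w.drop res.length with
         | [] => 0
         | y :: ys => if y = x then F ys else 0) else 0) := by
  by_cases hp : res <+: w
  · obtain ⟨t, rfl⟩ := hp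
    rw [if_pos (show res <+: res ++ t from List.prefix_append _ _)]
    rw [List.drop_left]
    have hd : (res ++ t).drop (res.length + 1) = t.drop 1 := by
      rw [← List.drop_drop, List.drop_left]
    rw [hd]
    simp only [List.prefix_append_right_inj]
    cases t with
    | nil => simp
    | cons y ys => simp [List.cons_prefix_cons, eq_comm]
  · rw [if_neg hp, if_neg (fun hc => hp ((List.prefix_append res [x]).trans hc))]


lemma sum_indicator (l : List (List Char)) (hl : l.Nodup) (f : List Char → Int) (r : List Char) :
    (l.map (fun k => f k * (if k = r then 1 else 0))).sum = if r ∈ l then f r else 0 := by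
  induction l with
  | nil => simp
  | cons a t ih =>
    rw [List.nodup_cons] at hl
    rw [List.map_cons, List.sum_cons, ih hl.2]
    by_cases ha : a = r
    · subst ha
      simp [hl.1]
    · simp [ha, Ne.symm ha]

lemma expandQ (ps res w : List Char) :
    (if res <+: w then Wref ('?' :: ps) (w.drop res.length) else 0)
    = (if res ++ ['a'] <+: w then Wref ps (w.drop (res ++ ['a']).length) else 0)
      + (if res ++ ['b'] <+: w then Wref ps (w.drop (res ++ ['b']).length) else 0)
      + (if res ++ ['c'] <+: w then Wref ps (w.drop (res ++ ['c']).length) else 0)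
      + (if res ++ ['d'] <+: w then Wref ps (w.drop (res ++ ['d']).length) else 0)
      + (if res ++ ['e'] <+: w then Wref ps (w.drop (res ++ ['e']).length) else 0)
      + (if res <+: w then Wref ps (w.drop res.length) else 0) := by
  simp only [List.length_append, List.length_cons, List.length_nil, Nat.zero_add]
  rw [key_snoc (Wref ps) res w 'a', key_snoc (Wref ps) res w 'b', key_snoc (Wref ps) res w 'c',
    key_snoc (Wref ps) res w 'd', key_snoc (Wref ps) res w 'e']
  by_cases hp : res <+: w
  · simp only [if_pos hp]
    cases hdrop : w.drop res.length with
    | nil => simp [Wref]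
    | cons y ys =>
      have hW : Wref ('?' :: ps) (y :: ys) = Wref ps (y :: ys) + (if y ∈ lettersB then Wref ps ys else 0) := by
        simp [Wref]
      rw [hW, ← letter_sum y (Wref ps ys)]
      ring
  · simp [if_neg hp]


lemma expandC (ps res w : List Char) (c : Char) (hc : ¬ c = '?') :
    (if res <+: w then Wref (c :: ps) (w.drop res.length) else 0)
    = (if res ++ [c] <+: w then Wref ps (w.drop (res ++ [c]).length) else 0) := by
  simp only [List.length_append, List.length_cons, List.length_nil, Nat.zero_add]
  rw [key_snoc (Wref ps) res w c]
  by_cases hp : res <+: w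
  · simp only [if_pos hp]
    cases hdrop : w.drop res.length with
    | nil => simp [Wref, hc]
    | cons y ys => simp [Wref, hc]
  · simp [if_neg hp]

lemma dfsA_eq (xs : List (List Char)) (pattern : List Char) (u : Nat) (res : List Char)
    (h : u ≤ pattern.length) :
    dfsA pattern pattern.length u res (PySem.Set.ofList [])
        (xs.foldl (fun d w => d.modify w 0 (· + 1)) PySem.Dict.empty)
    = (((PySem.Dict.counter xs).items).map
        (fun wv => wv.2 * (if res <+: wv.1 then Wref (pattern.drop u) (wv.1.drop res.length) else 0))).sum := by
  induction hk : pattern.length - u generalizing u res with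
  | zero =>
    have hu : u = pattern.length := by omega
    subst hu
    rw [dfsA]
    rw [if_pos rfl]
    have hst : (PySem.Set.ofList ([] : List (List Char))).contains res = false := by
      simp [PySem.Set.ofList, PySem.Set.contains]
    rw [hst]
    simp only [Bool.false_eq_true, if_false]
    have hm : ∀ d : PySem.Dict (List Char) Int,
        (match d.get? res with | some v => v | none => 0) = d.getD res 0 := by
      intro d; simp [PySem.Dict.getD]; cases d.get? res <;> rfl
    rw [hm, PySem.Dict.getD_foldl_modify_add_one]
    have hempty : (PySem.Dict.empty : PySem.Dict (List Char) Int).getD res 0 = 0 := rfl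
    rw [hempty, List.drop_length, PySem.Dict.items_counter, List.map_map]
    have hper : ∀ k ∈ (PySem.Set.ofList xs : List (List Char)),
        ((fun wv => wv.2 * (if res <+: wv.1 then Wref [] (wv.1.drop res.length) else 0)) ∘
          (fun k => (k, (xs.count k : Int)))) k
        = (fun k => (xs.count k : Int) * (if k = res then 1 else 0)) k := by
      intro k _
      simp only [Function.comp, Wref]
      congr 1
      by_cases hp : res <+: k
      · by_cases hd : k.drop res.length = []
        · have : k = res := by
            have h1 := hp.length_le
            rw [List.drop_eq_nil_iff] at hd
            exact (hp.eq_of_length (by omega)).symm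
          simp [this]
        · have : ¬ k = res := by rintro rfl; simp at hd
          rw [if_pos hp, if_neg hd, if_neg this]
      · have : ¬ k = res := by rintro rfl; exact hp (List.prefix_refl _)
        simp [hp, this]
    rw [List.map_congr_left hper, sum_indicator _ (PySem.Set.nodup_ofList xs)]
    by_cases hres : res ∈ xs
    · simp [PySem.Set.mem_ofList, hres]
    · simp [PySem.Set.mem_ofList, hres, List.count_eq_zero_of_not_mem hres]
  | succ k ihk =>
    have hu : u < pattern.length := by omega
    rw [dfsA]
    rw [if_neg (by omega : ¬ u = pattern.length), dif_pos hu]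
    simp only []
    have ihs := fun r => ihk (u + 1) r (by omega) (by omega)
    rw [List.drop_eq_getElem_cons hu]
    by_cases hc : pattern[u] = '?'
    · rw [if_pos hc, hc]
      rw [ihs (res ++ ['a']), ihs (res ++ ['b']), ihs (res ++ ['c']), ihs (res ++ ['d']),
        ihs (res ++ ['e']), ihs res]
      have hmap : (((PySem.Dict.counter xs).items).map
          (fun wv => wv.2 * (if res <+: wv.1 then Wref ('?' :: pattern.drop (u + 1)) (wv.1.drop res.length) else 0)))
          = (((PySem.Dict.counter xs).items).map
            (fun wv =>
              wv.2 * (if res ++ ['a'] <+: wv.1 then Wref (pattern.drop (u + 1)) (wv.1.drop (res ++ ['a']).length) else 0)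
              + wv.2 * (if res ++ ['b'] <+: wv.1 then Wref (pattern.drop (u + 1)) (wv.1.drop (res ++ ['b']).length) else 0)
              + wv.2 * (if res ++ ['c'] <+: wv.1 then Wref (pattern.drop (u + 1)) (wv.1.drop (res ++ ['c']).length) else 0)
              + wv.2 * (if res ++ ['d'] <+: wv.1 then Wref (pattern.drop (u + 1)) (wv.1.drop (res ++ ['d']).length) else 0)
              + wv.2 * (if res ++ ['e'] <+: wv.1 then Wref (pattern.drop (u + 1)) (wv.1.drop (res ++ ['e']).length) else 0)
              + wv.2 * (if res <+: wv.1 then Wref (pattern.drop (u + 1)) (wv.1.drop res.length) else 0))) := by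
        apply List.map_congr_left
        intro wv _
        rw [expandQ]
        ring
      rw [hmap]
      simp only [PySem.List.sum_map_add_int]
      simp only [zero_add]
    · rw [if_neg hc]
      rw [ihs (res ++ [pattern[u]])]
      have hmap : (((PySem.Dict.counter xs).items).map
          (fun wv => wv.2 * (if res <+: wv.1 then Wref (pattern[u] :: pattern.drop (u + 1)) (wv.1.drop res.length) else 0)))
          = (((PySem.Dict.counter xs).items).map
            (fun wv => wv.2 * (if res ++ [pattern[u]] <+: wv.1 then Wref (pattern.drop (u + 1)) (wv.1.drop (res ++ [pattern[u]]).length) else 0))) := by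
        apply List.map_congr_left
        intro wv _
        rw [expandC _ _ _ _ hc]
      rw [hmap]
      simp only [zero_add]


lemma Wref_no_q (ps : List Char) (h : '?' ∉ ps) : ∀ w, Wref ps w = if w = ps then 1 else 0 := by
  induction ps with
  | nil => intro w; simp [Wref]
  | cons p ps ih =>
    intro w
    rw [List.mem_cons, not_or] at h
    cases w with
    | nil => simp [Wref, Ne.symm h.1]
    | cons x xs =>
      simp only [Wref, if_neg (Ne.symm h.1), ih h.2]
      by_cases hx : x = p
      · simp [hx]
      · simp [hx]

lemma Wref_zero_outside (ps : List Char) : ∀ w : List Char,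
    w.length < ps.length - ps.count '?' ∨ ps.length < w.length → Wref ps w = 0 := by
  induction ps with
  | nil => intro w hw; simp only [List.length_nil] at hw
           have : w ≠ [] := by rintro rfl; simp at hw
           simp [Wref, this]
  | cons p ps ih =>
    intro w hw
    have hcle := List.count_le_length (a := '?') (l := ps)
    by_cases hp : p = '?'
    · subst hp
      simp only [List.length_cons, List.count_cons_self] at hw
      have h1 : Wref ps w = 0 := ih w (by omega)
      cases w with
      | nil => simp [Wref, h1]
      | cons x xs =>
        have h2 : Wref ps xs = 0 := ih xs (by simp at hw ⊢; omega)
        simp [Wref, h1, h2]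
    · simp only [List.length_cons, List.count_cons_of_ne (by exact hp : p ≠ '?')] at hw
      cases w with
      | nil => simp [Wref, hp]
      | cons x xs =>
        have h2 : Wref ps xs = 0 := ih xs (by simp at hw ⊢; omega)
        simp [Wref, hp, h2]

lemma count_sum (xs : List (List Char)) (r : List Char) :
    (((PySem.Dict.counter xs).items).map (fun wv => wv.2 * (if wv.1 = r then 1 else 0))).sum
    = (xs.count r : Int) := by
  rw [PySem.Dict.items_counter, List.map_map]
  have hper : ∀ k ∈ (PySem.Set.ofList xs : List (List Char)),
      ((fun wv => wv.2 * (if wv.1 = r then 1 else 0)) ∘ (fun k => (k, (xs.count k : Int)))) k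
      = (fun k => (xs.count k : Int) * (if k = r then 1 else 0)) k := by
    intro k _; rfl
  rw [List.map_congr_left hper, sum_indicator _ (PySem.Set.nodup_ofList xs)]
  by_cases hres : r ∈ xs
  · simp [PySem.Set.mem_ofList, hres]
  · simp [PySem.Set.mem_ofList, hres, List.count_eq_zero_of_not_mem hres]


-- ===== VERDICT (by name: the statement is the Claim_ definition above) =====
theorem count_matching_words_spec : Claim_equal_count_matching_words := by
  intro words patterns _
  unfold Spec_count_matching_words
  unfold count_matching_words count_matching_words_alt
  simp only []
  have hA : (words.foldl (fun d w => d.modify w.toList 0 (· + 1)) (PySem.Dict.empty : PySem.Dict (List Char) Int))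
      = ((words.map String.toList).foldl (fun d w => d.modify w 0 (· + 1)) PySem.Dict.empty) :=
    (List.foldl_map (f := String.toList)
      (g := fun (d : PySem.Dict (List Char) Int) w => d.modify w 0 (· + 1))).symm
  have hB : (words.foldl (fun d w => d.insert w.toList (d.getD w.toList 0 + 1)) (PySem.Dict.empty : PySem.Dict (List Char) Int))
      = ((words.map String.toList).foldl (fun d w => d.insert w (d.getD w 0 + 1)) PySem.Dict.empty) :=
    (List.foldl_map (f := String.toList)
      (g := fun (d : PySem.Dict (List Char) Int) w => d.insert w (d.getD w 0 + 1))).symm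
  rw [hA, hB]
  rw [PySem.Dict.foldl_insert_getD_add_one_eq_counter]
  rw [PySem.List.foldl_append_singleton_eq_map]
  rw [List.nil_append]
  apply List.map_congr_left
  intro pat _
  rw [dfsA_eq (words.map String.toList) pat.toList 0 [] (Nat.zero_le _)]
  by_cases hk : pat.toList.count '?' = 0
  · rw [if_pos hk]
    rw [← PySem.Dict.foldl_insert_getD_add_one_eq_counter,
      PySem.Dict.getD_foldl_insert_add_one, PySem.Dict.foldl_insert_getD_add_one_eq_counter]
    have hnq : '?' ∉ pat.toList := List.count_eq_zero.mp hk
    have hper : ∀ wv ∈ (PySem.Dict.counter (words.map String.toList)).items,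
        (fun wv => wv.2 * (if [] <+: wv.1 then Wref (pat.toList.drop 0) (wv.1.drop ([] : List Char).length) else 0)) wv
        = (fun wv => wv.2 * (if wv.1 = pat.toList then 1 else 0)) wv := by
      intro wv _
      simp only [List.drop_zero, List.length_nil, List.nil_prefix, if_true,
        Wref_no_q pat.toList hnq wv.1]
    rw [List.map_congr_left hper, count_sum]
    have hempty : (PySem.Dict.empty : PySem.Dict (List Char) Int).getD pat.toList 0 = 0 := rfl
    rw [hempty, zero_add]
  · rw [if_neg hk]
    apply congrArg List.sum
    apply List.map_congr_left
    intro wv _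
    by_cases hband : pat.toList.length - pat.toList.count '?' ≤ wv.1.length ∧ wv.1.length ≤ pat.toList.length
    · rw [if_pos hband]
      simp [waysB_eq, List.nil_prefix]
    · rw [if_neg hband]
      have hz : Wref pat.toList wv.1 = 0 := Wref_zero_outside pat.toList wv.1 (by omega)
      simp [hz, List.nil_prefix]
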